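-- pv_equiv track=rewrite | github.com/YakultSmoothie/PY_No_MoNo | plot_tc_tracks.py | format_years_for_title
-- ===== SOURCE A (Python) =====
-- def format_years_for_title(years):
--     """將年份列表格式化為標題顯示用的字串
--
--     Args:
--         years: 排序後的年份列表
--
--     Returns:
--         str: 格式化後的年份字串，例如 "1991-1995, 2000, 2023-2024"
--     """
--     if not years:
--         return ""
--
--     year_groups = []
--     start = prev = years[0]
--
--     for curr in years[1:] + [None]:
--         if curr is None or curr != prev + 1:
--             if start == prev:
--                 year_groups.append(str(start))
--             else:
--                 year_groups.append(f'{start}-{prev}')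
--             start = curr
--         prev = curr
--
--     return ", ".join(year_groups)
-- ===== SOURCE B (Python) =====
-- from itertools import groupby
--
-- def format_years_for_title(years):
--     if not years:
--         return ""
--     parts = []
--     for _, grp in groupby(enumerate(years), key=lambda t: t[1] - t[0]):
--         run = list(grp)
--         first, last = run[0][1], run[-1][1]
--         parts.append(str(first) if first == last else f"{first}-{last}")
--     return ", ".join(parts)
-- ===== Notes on version B (the rewrite author's own statement) =====
-- stated objective: idiomatic
-- what changed: Replaced the sentinel-terminated state machine (start/prev accumulator fed a trailing None) by itertools.groupby over enumerate(years) with the value-minus-index key, formatting each run from its first and last element.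
import Mathlib
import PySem

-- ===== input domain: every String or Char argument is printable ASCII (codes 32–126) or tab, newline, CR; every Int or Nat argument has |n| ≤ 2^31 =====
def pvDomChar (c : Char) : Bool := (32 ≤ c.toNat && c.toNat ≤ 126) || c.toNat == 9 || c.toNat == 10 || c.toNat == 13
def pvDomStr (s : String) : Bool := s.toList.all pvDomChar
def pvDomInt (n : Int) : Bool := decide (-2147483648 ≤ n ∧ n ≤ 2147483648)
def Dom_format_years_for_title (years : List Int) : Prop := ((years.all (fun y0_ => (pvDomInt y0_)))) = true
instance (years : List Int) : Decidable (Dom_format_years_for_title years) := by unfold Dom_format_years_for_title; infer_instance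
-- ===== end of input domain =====

-- B replaces A's sentinel-terminated start/prev state machine by grouping enumerate(years)
-- on the value-minus-index key (idiomatic itertools.groupby style); same cost, same values.

-- ===== PORT A =====
-- str(x) where x may be the None sentinel (Python prints "None"; never reached with a value result)
def pyOptStr (o : Option Int) : String :=
  match o with
  | some n => PySem.Int.toStr n
  | none => "None"

-- one iteration of A's for-loop over years[1:] + [None]; state = (year_groups, start, prev)
def stepA (st : List String × Option Int × Option Int) (curr : Option Int) :
    List String × Option Int × Option Int :=
  let (groups, start, prev) := st
  if curr = none ∨ curr ≠ prev.map (· + 1) then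
    let groups := if start = prev then groups ++ [pyOptStr start]
                  else groups ++ [pyOptStr start ++ "-" ++ pyOptStr prev]
    (groups, curr, curr)
  else
    (groups, start, curr)

def format_years_for_title (years : List Int) : String :=
  match years with
  | [] => ""
  | y0 :: rest =>
    let st := (rest.map some ++ [none]).foldl stepA (([] : List String), some y0, some y0)
    PySem.Str.join ", " st.1

-- ===== PORT B =====
-- hand port of itertools.groupby(enumerate(years), key=λ t, t.2 - t.1): maximal adjacent
-- runs with equal key
def groupRuns : List (Int × Int) → List (List (Int × Int))
  | [] => []
  | [x] => [[x]]
  | x :: y :: xs =>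
    match groupRuns (y :: xs) with
    | [] => [[x]]
    | g :: gs =>
      if x.2 - x.1 = y.2 - y.1 then (x :: g) :: gs else [x] :: g :: gs

-- format one run from its first and last value
def fmtRun (g : List (Int × Int)) : String :=
  let first := (g.headD (0, 0)).2
  let last := (g.getLastD (0, 0)).2
  if first = last then PySem.Int.toStr first
  else PySem.Int.toStr first ++ "-" ++ PySem.Int.toStr last

def format_years_for_title_alt (years : List Int) : String :=
  match years with
  | [] => ""
  | _ :: _ =>
    PySem.Str.join ", " ((groupRuns (PySem.List.enumerate years)).map fmtRun)

-- ===== PRECONDITION & SPEC =====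
def Spec_format_years_for_title (years : List Int) (out : String) : Prop := out = format_years_for_title_alt years
instance (years : List Int) (out : String) : Decidable (Spec_format_years_for_title years out) := by unfold Spec_format_years_for_title; infer_instance

-- ===== CLAIM (what is proved, stated in full; the proofs are below) =====
def Claim_equal_format_years_for_title : Prop := ∀ (years : List Int), Dom_format_years_for_title years → Spec_format_years_for_title years (format_years_for_title years)

-- ===== LEMMAS AND PROOFS =====

-- common reference: the list of formatted range strings, with open run s..p
def rangeStr (s p : Int) : String :=
  if s = p then PySem.Int.toStr s else PySem.Int.toStr s ++ "-" ++ PySem.Int.toStr p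

def specRuns (s p : Int) : List Int → List String
  | [] => [rangeStr s p]
  | c :: rest => if c = p + 1 then specRuns s c rest
                 else rangeStr s p :: specRuns c c rest

theorem foldA_spec (rest : List Int) :
    ∀ (groups : List String) (s p : Int),
      (rest.map some ++ [none]).foldl stepA (groups, some s, some p)
        = (groups ++ specRuns s p rest, none, none) := by
  induction rest with
  | nil =>
    intro groups s p
    simp [stepA, pyOptStr, specRuns, rangeStr]
    by_cases h : s = p <;> simp [h]
  | cons c rest ih =>
    intro groups s p
    by_cases h : c = p + 1
    · simp [stepA, h, ih, specRuns]
    · have hne : ¬ (some c = some (p + 1)) := by simpa using h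
      simp [stepA, hne, ih, specRuns, rangeStr, h, pyOptStr]
      by_cases hsp : s = p <;> simp [hsp]

theorem groupRuns_head (x : Int × Int) (xs : List (Int × Int)) :
    ∃ t gs, groupRuns (x :: xs) = (x :: t) :: gs := by
  cases xs with
  | nil => exact ⟨[], [], rfl⟩
  | cons y ys =>
    obtain ⟨t, gs, h⟩ := groupRuns_head y ys
    by_cases hk : x.2 - x.1 = y.2 - y.1
    · exact ⟨y :: t, gs, by simp [groupRuns, h, hk]⟩
    · exact ⟨[], (y :: t) :: gs, by simp [groupRuns, h, hk]⟩

theorem fmtRun_eq (g : List (Int × Int)) :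
    fmtRun g = rangeStr (g.headD (0, 0)).2 (g.getLastD (0, 0)).2 := rfl

theorem getLastD_cons_cons (a b : Int × Int) (l : List (Int × Int)) (d : Int × Int) :
    (a :: b :: l).getLastD d = (b :: l).getLastD d := by
  simp [List.getLastD_eq_getLast?]

theorem groupRuns_spec (rest : List Int) :
    ∀ (i p s : Int) (g : List (Int × Int)) (gs : List (List (Int × Int))),
      groupRuns (PySem.List.enumerate (p :: rest) i) = g :: gs →
      rangeStr s ((g.getLastD (0, 0)).2) :: gs.map fmtRun = specRuns s p rest := by
  induction rest with
  | nil =>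
    intro i p s g gs h
    simp [PySem.List.enumerate_cons, PySem.List.enumerate_nil, groupRuns] at h
    obtain ⟨hg, hgs⟩ := h
    subst hg; subst hgs
    simp [specRuns]
  | cons c rest ih =>
    intro i p s g gs h
    obtain ⟨t, gs', hg⟩ := groupRuns_head (i + 1, c) (PySem.List.enumerate rest (i + 1 + 1))
    rw [PySem.List.enumerate_cons, PySem.List.enumerate_cons] at h
    have hg2 : groupRuns (PySem.List.enumerate (c :: rest) (i + 1))
        = ((i + 1, c) :: t) :: gs' := by
      rw [PySem.List.enumerate_cons]; exact hg
    simp only [groupRuns, hg] at h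
    by_cases hc : c = p + 1
    · have hk : ((i : Int), p).2 - (i, p).1 = ((i + 1 : Int), c).2 - (i + 1, c).1 := by
        simp; omega
      rw [if_pos hk] at h
      obtain ⟨hgeq, hgseq⟩ := List.cons_eq_cons.mp h
      subst hgeq; subst hgseq
      rw [getLastD_cons_cons]
      rw [show specRuns s p (c :: rest) = specRuns s c rest by simp [specRuns, hc]]
      exact ih (i + 1) c s ((i + 1, c) :: t) gs' hg2
    · have hk : ¬ ((i : Int), p).2 - (i, p).1 = ((i + 1 : Int), c).2 - (i + 1, c).1 := by
        simp; omega
      rw [if_neg hk] at h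
      obtain ⟨hgeq, hgseq⟩ := List.cons_eq_cons.mp h
      subst hgeq; subst hgseq
      have htail := ih (i + 1) c c ((i + 1, c) :: t) gs' hg2
      rw [show specRuns s p (c :: rest) = rangeStr s p :: specRuns c c rest by
        simp [specRuns, hc]]
      simp only [List.getLastD, List.map_cons, fmtRun_eq]
      rw [← htail]
      simp [List.getLast?_eq_some_getLast]

theorem map_fmtRun (p : Int) (rest : List Int) (i : Int) :
    (groupRuns (PySem.List.enumerate (p :: rest) i)).map fmtRun
      = specRuns p p rest := by
  obtain ⟨t, gs, hg⟩ := groupRuns_head (i, p) (PySem.List.enumerate rest (i + 1))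
  have hg' : groupRuns (PySem.List.enumerate (p :: rest) i) = ((i, p) :: t) :: gs := by
    rw [PySem.List.enumerate_cons]; exact hg
  rw [hg', List.map_cons, fmtRun_eq]
  have := groupRuns_spec rest i p p ((i, p) :: t) gs hg'
  simpa using this

theorem format_years_for_title_spec : Claim_equal_format_years_for_title := by
  intro years _
  unfold Spec_format_years_for_title
  cases years with
  | nil => rfl
  | cons y0 rest =>
    simp only [format_years_for_title, format_years_for_title_alt]
    rw [foldA_spec rest [] y0 y0, map_fmtRun y0 rest 0]
    rfl
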